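-- pv_equiv track=rewrite | github.com/charan2108/pyprocharmprojects | pythoncrashcourse/Strings/camelcase.py | solution
-- ===== SOURCE A (Python) =====
-- def solution(N):
--     N = bin(N)[2:]
--     b = 0
--     maxb = 0
--     for a in N:
--         if int(a)==0:
--             b+=1
--         elif int(a)==1:
--             maxb=max(b,maxb)
--             b=0
--     return maxb
-- ===== SOURCE B (Python) =====
-- def solution(N):
--     parts = bin(N)[2:].split('1')
--     return max((len(p) for p in parts[:-1]), default=0)
-- ===== Notes on version B (the rewrite author's own statement) =====
-- stated objective: simpler
-- what changed: Replaces the per-character stateful loop with two accumulators by splitting the binary string on '1' and taking the max length of all zero-run segments except the trailing one.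
import Mathlib
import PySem

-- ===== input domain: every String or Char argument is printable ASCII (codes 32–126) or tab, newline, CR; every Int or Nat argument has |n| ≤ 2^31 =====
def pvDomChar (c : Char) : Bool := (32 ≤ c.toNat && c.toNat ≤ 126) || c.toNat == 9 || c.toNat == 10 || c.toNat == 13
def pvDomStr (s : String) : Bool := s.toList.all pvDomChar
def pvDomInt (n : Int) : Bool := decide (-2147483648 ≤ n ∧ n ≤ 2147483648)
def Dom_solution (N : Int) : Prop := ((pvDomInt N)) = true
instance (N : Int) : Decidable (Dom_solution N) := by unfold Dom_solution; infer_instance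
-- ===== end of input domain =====

-- B splits the binary representation on '1' and takes the max length of the zero-run
-- segments except the trailing one, instead of A's per-character loop with two accumulators.

-- shared helper: bin(N)[2:] for N ≥ 0, as a list of '0'/'1' chars (MSB first); exact on Pre_.
def binAux : Nat → List Char
  | 0 => []
  | (n+1) => (if (n+1) % 2 = 0 then '0' else '1') :: binAux ((n+1) / 2)
  decreasing_by exact Nat.div_lt_self (Nat.succ_pos n) (by norm_num)

def binChars (n : Nat) : List Char := if n = 0 then ['0'] else (binAux n).reverse

-- ===== PORT A =====
def solution (N : Int) : Int :=
  let l := binChars N.toNat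
  (l.foldl (fun (st : Int × Int) a =>
      if a = '0' then (st.1 + 1, st.2)
      else if a = '1' then (0, max st.1 st.2)
      else st) (0, 0)).2

-- ===== PORT B =====
-- hand port of str.split('1') on a list of chars (exact for a one-char separator)
def pySplit1 : List Char → List (List Char)
  | [] => [[]]
  | c :: t =>
    if c = '1' then [] :: pySplit1 t
    else
      match pySplit1 t with
      | [] => [[c]]
      | s :: ss => (c :: s) :: ss

def solution_alt (N : Int) : Int :=
  let parts := pySplit1 (binChars N.toNat)
  ((parts.dropLast).map (fun p => (p.length : Int))).foldl (fun m x => max m x) 0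

-- ===== PRECONDITION & SPEC =====
-- Pre_ excludes N < 0, where A raises ValueError (bin(-k)[2:] starts with 'b', so int('b') fails).
def Pre_solution (N : Int) : Prop := 0 ≤ N
instance (N : Int) : Decidable (Pre_solution N) := by unfold Pre_solution; infer_instance
def pvWitness_solution : Int := (9)

def Spec_solution (N : Int) (out : Int) : Prop := out = solution_alt N
instance (N : Int) (out : Int) : Decidable (Spec_solution N out) := by unfold Spec_solution; infer_instance

-- ===== CLAIM (what is proved, stated in full; the proofs are below) =====
def Claim_equal_solution : Prop := ∀ (N : Int), Dom_solution N → Pre_solution N → Spec_solution N (solution N)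

-- ===== LEMMAS AND PROOFS =====

theorem pySplit1_ne_nil (l : List Char) : pySplit1 l ≠ [] := by
  cases l with
  | nil => simp [pySplit1]
  | cons c t =>
    simp only [pySplit1]
    split
    · simp
    · cases h : pySplit1 t <;> simp

theorem binAux_chars (n : Nat) : ∀ c ∈ binAux n, c = '0' ∨ c = '1' := by
  induction n using Nat.strong_induction_on with
  | _ n ih =>
    cases n with
    | zero => simp [binAux]
    | succ m =>
      intro c hc
      rw [binAux] at hc
      rcases List.mem_cons.mp hc with h | h
      · subst h; split <;> simp
      · exact ih ((m+1)/2) (Nat.div_lt_self (Nat.succ_pos m) (by norm_num)) c h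

theorem binChars_chars (n : Nat) : ∀ c ∈ binChars n, c = '0' ∨ c = '1' := by
  unfold binChars
  split
  · simp
  · intro c hc
    exact binAux_chars n c (List.mem_reverse.mp hc)

-- B-side value of A's loop result, expressed on the split segments
def G (segs : List (List Char)) (b maxb : Int) : Int :=
  match segs with
  | [] => maxb
  | [_] => maxb
  | s :: rest =>
    ((rest.dropLast).map (fun p => (p.length : Int))).foldl (fun m x => max m x) (max maxb (b + s.length))

theorem foldl_max_congr (xs : List Int) {a b : Int} (h : a = b) :
    xs.foldl (fun m x => max m x) a = xs.foldl (fun m x => max m x) b := by rw [h]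

theorem key (l : List Char) (h : ∀ c ∈ l, c = '0' ∨ c = '1') (b maxb : Int) :
    (l.foldl (fun (st : Int × Int) a =>
      if a = '0' then (st.1 + 1, st.2)
      else if a = '1' then (0, max st.1 st.2)
      else st) (b, maxb)).2 = G (pySplit1 l) b maxb := by
  induction l generalizing b maxb with
  | nil => simp [pySplit1, G]
  | cons c t ih =>
    have hc := h c (List.mem_cons_self ..)
    have ht : ∀ x ∈ t, x = '0' ∨ x = '1' := fun x hx => h x (List.mem_cons_of_mem _ hx)
    rcases hc with hc | hc
    · subst hc
      simp only [List.foldl_cons, Char.reduceEq, reduceIte]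
      rw [ih ht]
      have hne := pySplit1_ne_nil t
      simp only [pySplit1, Char.reduceEq, reduceIte]
      cases hs : pySplit1 t with
      | nil => exact absurd hs hne
      | cons s ss =>
        cases ss with
        | nil => simp [G]
        | cons s2 ss2 =>
          simp only [G]
          apply foldl_max_congr
          simp only [List.length_cons]
          push_cast
          omega
    · subst hc
      simp only [List.foldl_cons, Char.reduceEq, reduceIte]
      rw [ih ht]
      have hne := pySplit1_ne_nil t
      simp only [pySplit1, reduceIte]
      cases hs : pySplit1 t with
      | nil => exact absurd hs hne
      | cons s ss =>
        cases ss with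
        | nil =>
          simp only [G, show ([s] : List (List Char)).dropLast = [] from rfl, List.map_nil,
            List.foldl_nil, List.length_nil, Nat.cast_zero]
          omega
        | cons s2 ss2 =>
          simp only [G, List.dropLast_cons_of_ne_nil (show (s2 :: ss2 : List (List Char)) ≠ [] by simp),
            List.map_cons, List.foldl_cons, List.length_nil, Nat.cast_zero]
          apply foldl_max_congr
          have h1 : (0:Int) ≤ (s.length : Int) := Int.natCast_nonneg _
          omega

-- ===== VERDICT (by name: the statement is the Claim_ definition above) =====
theorem solution_spec : Claim_equal_solution := by
  intro N _ _
  unfold Spec_solution solution solution_alt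
  rw [key (binChars N.toNat) (binChars_chars N.toNat) 0 0]
  have hne := pySplit1_ne_nil (binChars N.toNat)
  cases hs : pySplit1 (binChars N.toNat) with
  | nil => exact absurd hs hne
  | cons s ss =>
    cases ss with
    | nil => simp [G]
    | cons s2 ss2 =>
      simp only [G, List.dropLast_cons_of_ne_nil (by simp : (s2 :: ss2 : List (List Char)) ≠ []),
        List.map_cons, List.foldl_cons]
      apply foldl_max_congr
      have h1 : (0:Int) ≤ (s.length : Int) := by positivity
      omega
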